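-- pv_equiv track=rewrite | github.com/harshsoni-harsh/CLAs | Sem_1/others/n.py | generate_n
-- ===== SOURCE A (Python) =====
-- def generate_n(words, n):
--     words.sort()
--     items=list(range(len(words)))
--     combination_1=[]
--     for i in items:
--         combination_1.append([i])
--     combination=combination_1
--     combination_3=[combination]
--     for x in range(1,n):
--         combination=[]
--         for i in combination_1:
--             for j in items:
--                 if(j>i[-1]):
--                     combination.append(i+[j])
--         combination_1=combination
--         combination_3.append(combination)
--     word_combinations=[]
--     for k in combination_3:
--         for i in k:
--             line=[]
--             for j in i:
--                 line.append(words[j])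
--             word_combinations.append(tuple(line))
--     return sorted(set(word_combinations))
-- ===== SOURCE B (Python) =====
-- def _combos(ws, k):
--     # all k-element combinations of ws, by position, as tuples
--     if k == 0:
--         return [()]
--     if len(ws) < k:
--         return []
--     first, rest = ws[0], ws[1:]
--     with_first = [(first,) + c for c in _combos(rest, k - 1)]
--     return with_first + _combos(rest, k)
--
-- def generate_n(words, n):
--     words.sort()
--     result = set(_combos(words, 1))
--     for k in range(2, n + 1):
--         result |= set(_combos(words, k))
--     return sorted(result)
-- ===== Notes on version B (the rewrite author's own statement) =====
-- stated objective: alternative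
-- what changed: A builds index combinations of each size by extending the previous size's prefixes with every larger index inside one stateful loop and only then maps indices to words; B generates each size's word combinations independently with a recursive first-in/first-out combinations helper and accumulates them in a set directly.
import Mathlib
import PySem

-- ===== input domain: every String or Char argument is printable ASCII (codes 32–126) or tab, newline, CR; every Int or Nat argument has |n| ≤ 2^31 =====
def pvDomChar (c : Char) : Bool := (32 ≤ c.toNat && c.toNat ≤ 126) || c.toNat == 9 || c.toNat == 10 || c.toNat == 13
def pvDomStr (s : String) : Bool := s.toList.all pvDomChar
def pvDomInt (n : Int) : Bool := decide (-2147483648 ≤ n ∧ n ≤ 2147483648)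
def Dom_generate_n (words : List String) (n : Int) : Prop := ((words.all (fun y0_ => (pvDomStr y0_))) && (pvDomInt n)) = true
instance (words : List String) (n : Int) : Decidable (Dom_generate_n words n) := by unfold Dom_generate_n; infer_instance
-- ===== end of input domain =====

-- B generates each combination size independently with a recursive combinations helper instead of A's
-- prefix-extension loop over index lists; return-value equivalence only (both A and B sort `words` in place).

-- ===== PORT A =====
def generate_n (words : List String) (n : Int) : List (List String) :=
  let ws := PySem.List.sorted words (fun x => x) false
  let items : List Int := PySem.List.pyRange 0 (PySem.List.len ws) 1
  let combination_1 := items.foldl (fun acc i => acc ++ [[i]]) ([] : List (List Int))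
  let st := (PySem.List.pyRange 1 n 1).foldl
    (fun (st : List (List Int) × List (List (List Int))) _x =>
      let combination := st.1.foldl (fun acc i =>
          items.foldl (fun acc2 j =>
            if PySem.List.pyGetD i (-1) 0 < j then acc2 ++ [i ++ [j]] else acc2) acc) []
      (combination, st.2 ++ [combination]))
    (combination_1, [combination_1])
  let word_combinations := st.2.foldl (fun acc k =>
      k.foldl (fun acc2 i =>
        acc2 ++ [i.foldl (fun line j => line ++ [PySem.List.pyGetD ws j ""]) []]) acc) []
  PySem.List.sorted (PySem.Set.ofList word_combinations) (fun x => x) false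

-- ===== PORT B =====
def pvCombos : List String → Nat → List (List String)
  | _, 0 => [[]]
  | [], _ + 1 => []
  | w :: rest, k + 1 =>
    if rest.length + 1 < k + 1 then []
    else ((pvCombos rest k).map (fun c => w :: c)) ++ pvCombos rest (k + 1)

def generate_n_alt (words : List String) (n : Int) : List (List String) :=
  let ws := PySem.List.sorted words (fun x => x) false
  let result : PySem.Set (List String) := PySem.Set.ofList (pvCombos ws 1)
  let result := (PySem.List.pyRange 2 (n + 1) 1).foldl
      (fun r k => PySem.Set.union r (PySem.Set.ofList (pvCombos ws k.toNat))) result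
  PySem.List.sorted result (fun x => x) false

-- ===== PRECONDITION & SPEC =====
def Spec_generate_n (words : List String) (n : Int) (out : List (List String)) : Prop := out = generate_n_alt words n
instance (words : List String) (n : Int) (out : List (List String)) : Decidable (Spec_generate_n words n out) := by unfold Spec_generate_n; infer_instance

-- ===== CLAIM (what is proved, stated in full; the proofs are below) =====
def Claim_equal_generate_n : Prop := ∀ (words : List String) (n : Int), Dom_generate_n words n → Spec_generate_n words n (generate_n words n)

-- ===== LEMMAS AND PROOFS =====

/-- Index lists A manipulates: strictly increasing, in range, of length `k`. -/
def pvGood (L : Nat) (k : Nat) (l : List Int) : Prop :=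
  l.Pairwise (· < ·) ∧ (∀ j ∈ l, 0 ≤ j ∧ j < (L : Int)) ∧ l.length = k

def pvItems (L : Nat) : List Int := PySem.List.pyRange 0 (L : Int) 1

def pvStepC (L : Nat) (c1 : List (List Int)) : List (List Int) :=
  c1.foldl (fun acc i =>
    (pvItems L).foldl (fun acc2 j =>
      if PySem.List.pyGetD i (-1) 0 < j then acc2 ++ [i ++ [j]] else acc2) acc) []

def pvStep (L : Nat) (st : List (List Int) × List (List (List Int))) :
    List (List Int) × List (List (List Int)) :=
  (pvStepC L st.1, st.2 ++ [pvStepC L st.1])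

def pvInit (L : Nat) : List (List Int) × List (List (List Int)) :=
  ((pvItems L).map (fun i => [i]), [(pvItems L).map (fun i => [i])])

def pvWordOf (ws : List String) (i : List Int) : List String :=
  i.map (fun j => PySem.List.pyGetD ws j "")

lemma pv_foldl_iter {α β : Type} (F : β → β) (l : List α) (init : β) :
    l.foldl (fun st _ => F st) init = F^[l.length] init := by
  induction l generalizing init <;> simp_all [Function.iterate_succ_apply]

lemma generate_n_eq (words : List String) (n : Int) :
    generate_n words n =
      (let ws := PySem.List.sorted words (fun x => x) false
       let st := (PySem.List.pyRange 1 n 1).foldl (fun st _ => pvStep ws.length st) (pvInit ws.length)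
       PySem.List.sorted (PySem.Set.ofList (st.2.flatMap (fun c => c.map (pvWordOf ws))))
         (fun x => x) false) := by
  unfold generate_n
  simp only [PySem.List.len_eq, PySem.List.foldl_append_singleton_eq_map, List.nil_append,
    PySem.List.foldl_append_eq_flatMap, pvStep, pvStepC, pvInit, pvItems]
  rfl

lemma pv_le_getLast {l : List Int} (hp : l.Pairwise (· < ·)) (h : l ≠ []) :
    ∀ a ∈ l, a ≤ l.getLast h := by
  intro a ha
  have ha' : a ∈ l.dropLast ++ [l.getLast h] := by
    rw [List.dropLast_append_getLast h]; exact ha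
  have hp' : (l.dropLast ++ [l.getLast h]).Pairwise (· < ·) := by
    rw [List.dropLast_append_getLast h]; exact hp
  rcases List.mem_append.mp ha' with h1 | h1
  · exact le_of_lt ((List.pairwise_append.mp hp').2.2 a h1 _ (List.mem_singleton.mpr rfl))
  · simp only [List.mem_singleton] at h1; subst h1; exact le_refl _

lemma mem_pvStepC (L : Nat) (c1 : List (List Int)) (x : List Int) :
    x ∈ pvStepC L c1 ↔
      ∃ i ∈ c1, ∃ j : Int, (0 ≤ j ∧ j < (L : Int)) ∧ PySem.List.pyGetD i (-1) 0 < j ∧ x = i ++ [j] := by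
  unfold pvStepC
  have hfi : ∀ (i : List Int) (acc : List (List Int)),
      (pvItems L).foldl (fun acc2 j =>
        if PySem.List.pyGetD i (-1) 0 < j then acc2 ++ [i ++ [j]] else acc2) acc
      = acc ++ ((pvItems L).filter (fun j => decide (PySem.List.pyGetD i (-1) 0 < j))).map
          (fun j => i ++ [j]) := by
    intro i acc
    have := PySem.List.foldl_append_if (fun j => decide (PySem.List.pyGetD i (-1) 0 < j))
      (fun j => i ++ [j]) (pvItems L) acc
    simpa using this
  simp only [hfi]
  rw [PySem.List.foldl_append_eq_flatMap]
  simp only [List.nil_append, List.mem_flatMap, List.mem_map, List.mem_filter,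
    pvItems, PySem.List.mem_pyRange_one, decide_eq_true_eq]
  constructor
  · rintro ⟨i, hi, j, ⟨⟨h0, hL⟩, hgt⟩, rfl⟩
    exact ⟨i, hi, j, ⟨h0, hL⟩, hgt, rfl⟩
  · rintro ⟨i, hi, j, ⟨h0, hL⟩, hgt, rfl⟩
    exact ⟨i, hi, j, ⟨⟨h0, hL⟩, hgt⟩, rfl⟩

lemma good_extend (L k : Nat) (hk : 1 ≤ k) (x : List Int) :
    (∃ i, pvGood L k i ∧ ∃ j : Int, (0 ≤ j ∧ j < (L : Int)) ∧ PySem.List.pyGetD i (-1) 0 < j ∧ x = i ++ [j])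
      ↔ pvGood L (k + 1) x := by
  constructor
  · rintro ⟨i, ⟨hp, hb, hl⟩, j, ⟨h0, hL⟩, hgt, rfl⟩
    have hne : i ≠ [] := by intro h; subst h; simp at hl; omega
    rw [PySem.List.pyGetD_neg_one i 0 hne] at hgt
    refine ⟨?_, ?_, by simp [hl]⟩
    · rw [List.pairwise_append]
      exact ⟨hp, List.pairwise_singleton _ _, fun a ha b hb' => by
        simp only [List.mem_singleton] at hb'; subst hb'
        exact lt_of_le_of_lt (pv_le_getLast hp hne a ha) hgt⟩
    · intro a ha
      rcases List.mem_append.mp ha with h1 | h1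
      · exact hb a h1
      · simp only [List.mem_singleton] at h1; subst h1; exact ⟨h0, hL⟩
  · rintro ⟨hp, hb, hl⟩
    have hne : x ≠ [] := by intro h; subst h; simp at hl
    refine ⟨x.dropLast, ⟨?_, ?_, ?_⟩, x.getLast hne, ?_, ?_, (List.dropLast_append_getLast hne).symm⟩
    · exact hp.sublist (List.dropLast_sublist x)
    · exact fun j hj => hb j (List.dropLast_subset x hj)
    · simp [hl]
    · exact hb _ (List.getLast_mem hne)
    · have hne' : x.dropLast ≠ [] := by
        intro h
        have := congrArg List.length h
        simp [hl] at this; omega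
      rw [PySem.List.pyGetD_neg_one _ 0 hne']
      have hmem : x.dropLast.getLast hne' ∈ x.dropLast := List.getLast_mem hne'
      have hp' : (x.dropLast ++ [x.getLast hne]).Pairwise (· < ·) := by
        rw [List.dropLast_append_getLast hne]; exact hp
      exact (List.pairwise_append.mp hp').2.2 _ hmem _ (List.mem_singleton.mpr rfl)

lemma mem_init (L : Nat) (x : List Int) :
    x ∈ (pvItems L).map (fun i => [i]) ↔ pvGood L 1 x := by
  simp only [List.mem_map, pvItems, PySem.List.mem_pyRange_one, pvGood]
  constructor
  · rintro ⟨j, ⟨h0, hL⟩, rfl⟩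
    exact ⟨List.pairwise_singleton _ _, fun a ha => by simp at ha; subst ha; exact ⟨h0, hL⟩, rfl⟩
  · rintro ⟨-, hb, hl⟩
    match x, hl with
    | [j], _ => exact ⟨j, hb j (by simp), rfl⟩

lemma mem_iterA (L : Nat) : ∀ (m : Nat),
    (∀ x, x ∈ ((pvStep L)^[m] (pvInit L)).1 ↔ pvGood L (m + 1) x) ∧
    (∀ x, (∃ c ∈ ((pvStep L)^[m] (pvInit L)).2, x ∈ c) ↔
      ∃ k, 1 ≤ k ∧ k ≤ m + 1 ∧ pvGood L k x) := by
  intro m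
  induction m with
  | zero =>
    constructor
    · intro x
      simp only [Function.iterate_zero, id, pvInit]
      exact mem_init L x
    · intro x
      simp only [Function.iterate_zero, id, pvInit, List.mem_singleton]
      constructor
      · rintro ⟨c, rfl, hx⟩
        exact ⟨1, le_refl _, le_refl _, (mem_init L x).mp hx⟩
      · rintro ⟨k, h1, h2, hg⟩
        have : k = 1 := by omega
        subst this
        exact ⟨_, rfl, (mem_init L x).mpr hg⟩
  | succ m ih =>
    rw [Function.iterate_succ_apply']
    obtain ⟨ih1, ih2⟩ := ih
    constructor
    · intro x
      rw [pvStep, mem_pvStepC]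
      rw [← good_extend L (m + 1) (by omega) x]
      constructor
      · rintro ⟨i, hi, hrest⟩; exact ⟨i, (ih1 i).mp hi, hrest⟩
      · rintro ⟨i, hi, hrest⟩; exact ⟨i, (ih1 i).mpr hi, hrest⟩
    · intro x
      simp only [pvStep, List.mem_append, List.mem_singleton]
      constructor
      · rintro ⟨c, hc | rfl, hx⟩
        · obtain ⟨k, h1, h2, hg⟩ := (ih2 x).mp ⟨c, hc, hx⟩
          exact ⟨k, h1, by omega, hg⟩
        · have := (mem_pvStepC L _ x).mp hx
          have hg := (good_extend L (m + 1) (by omega) x).mp (by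
            obtain ⟨i, hi, hrest⟩ := this
            exact ⟨i, (ih1 i).mp hi, hrest⟩)
          exact ⟨m + 2, by omega, by omega, hg⟩
      · rintro ⟨k, h1, h2, hg⟩
        by_cases hk : k ≤ m + 1
        · obtain ⟨c, hc, hx⟩ := (ih2 x).mpr ⟨k, h1, hk, hg⟩
          exact ⟨c, Or.inl hc, hx⟩
        · have : k = m + 2 := by omega
          subst this
          refine ⟨pvStepC L ((pvStep L)^[m] (pvInit L)).1, Or.inr rfl, ?_⟩
          rw [mem_pvStepC]
          obtain ⟨i, hgi, hrest⟩ := (good_extend L (m + 1) (by omega) x).mpr hg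
          exact ⟨i, (ih1 i).mpr hgi, hrest⟩

lemma pv_fin_of_bounds : ∀ (i : List Int) (L : Nat), (∀ j ∈ i, 0 ≤ j ∧ j < (L : Int)) →
    ∃ is : List (Fin L), i = is.map (fun f => (f.val : Int)) := by
  intro i L
  induction i with
  | nil => intro _; exact ⟨[], rfl⟩
  | cons j i ih =>
    intro h
    obtain ⟨is, rfl⟩ := ih (fun a ha => h a (List.mem_cons_of_mem _ ha))
    have hj := h j (List.mem_cons_self ..)
    refine ⟨⟨j.toNat, by omega⟩ :: is, ?_⟩
    simp; omega

lemma pvWordOf_fin (ws : List String) : ∀ (is : List (Fin ws.length)),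
    pvWordOf ws (is.map (fun f => (f.val : Int))) = is.map (fun f => ws[f]) := by
  intro is
  induction is with
  | nil => rfl
  | cons f is ih =>
    simp only [List.map_cons, pvWordOf, List.map_cons] at ih ⊢
    rw [PySem.List.pyGetD_eq_getElem ws "" (by omega) (by exact_mod_cast f.isLt)]
    simp only [Int.toNat_natCast]
    exact congrArg _ ih

lemma pv_pairwise_fin {n : Nat} (is : List (Fin n)) :
    (is.map (fun f => (f.val : Int))).Pairwise (· < ·) ↔ is.Pairwise (· < ·) := by
  rw [List.pairwise_map]
  constructor
  · exact fun h => h.imp (fun hab => by exact_mod_cast hab)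
  · exact fun h => h.imp (fun hab => by exact_mod_cast hab)

lemma good_iff_sublist (ws : List String) (k : Nat) (x : List String) :
    (∃ i, pvGood ws.length k i ∧ x = pvWordOf ws i) ↔ (x.Sublist ws ∧ x.length = k) := by
  constructor
  · rintro ⟨i, ⟨hp, hb, hl⟩, rfl⟩
    obtain ⟨is, rfl⟩ := pv_fin_of_bounds i ws.length hb
    rw [pvWordOf_fin]
    refine ⟨List.map_getElem_sublist ((pv_pairwise_fin is).mp hp), ?_⟩
    simpa using hl
  · rintro ⟨hs, hl⟩
    obtain ⟨is, rfl, hp⟩ := List.sublist_eq_map_getElem hs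
    refine ⟨is.map (fun f => (f.val : Int)), ⟨?_, ?_, ?_⟩, ?_⟩
    · exact (pv_pairwise_fin is).mpr hp
    · rintro j hj
      simp only [List.mem_map] at hj
      obtain ⟨f, -, rfl⟩ := hj
      exact ⟨by omega, by exact_mod_cast f.isLt⟩
    · simpa using hl
    · rw [pvWordOf_fin]

lemma memA (ws : List String) (m : Nat) (x : List String) :
    x ∈ (((pvStep ws.length)^[m] (pvInit ws.length)).2.flatMap (fun c => c.map (pvWordOf ws))) ↔
      (x.Sublist ws ∧ 1 ≤ x.length ∧ x.length ≤ m + 1) := by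
  simp only [List.mem_flatMap, List.mem_map]
  constructor
  · rintro ⟨c, hc, i, hi, rfl⟩
    obtain ⟨k, h1, h2, hg⟩ := ((mem_iterA ws.length m).2 i).mp ⟨c, hc, hi⟩
    obtain ⟨hs, hl⟩ := (good_iff_sublist ws k _).mp ⟨i, hg, rfl⟩
    exact ⟨hs, by omega, by omega⟩
  · rintro ⟨hs, h1, h2⟩
    obtain ⟨i, hg, rfl⟩ := (good_iff_sublist ws x.length x).mpr ⟨hs, rfl⟩
    obtain ⟨c, hc, hi⟩ := ((mem_iterA ws.length m).2 i).mpr ⟨(pvWordOf ws i).length, h1, h2, hg⟩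
    exact ⟨c, hc, i, hi, rfl⟩

lemma mem_pvCombos : ∀ (ws : List String) (k : Nat) (x : List String),
    x ∈ pvCombos ws k ↔ (x.Sublist ws ∧ x.length = k) := by
  intro ws
  induction ws with
  | nil =>
    intro k x
    cases k with
    | zero => simp [pvCombos, List.sublist_nil, List.length_eq_zero_iff]
    | succ k' =>
      simp only [pvCombos, List.not_mem_nil, false_iff, not_and]
      intro hs
      simp [List.sublist_nil.mp hs]
  | cons w rest ih =>
    intro k x
    cases k with
    | zero =>
      simp only [pvCombos, List.mem_singleton]
      constructor
      · rintro rfl; exact ⟨List.nil_sublist _, rfl⟩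
      · rintro ⟨-, hl⟩; exact List.length_eq_zero_iff.mp hl
    | succ k' =>
      simp only [pvCombos]
      split_ifs with hlen
      · simp only [List.not_mem_nil, false_iff, not_and]
        intro hs hl
        have := hs.length_le
        simp at this; omega
      · simp only [List.mem_append, List.mem_map, ih, List.sublist_cons_iff]
        constructor
        · rintro (⟨c, ⟨hc, hcl⟩, rfl⟩ | ⟨hs, hl⟩)
          · exact ⟨Or.inr ⟨c, rfl, hc⟩, by simp [hcl]⟩
          · exact ⟨Or.inl hs, hl⟩
        · rintro ⟨hs | ⟨r, rfl, hr⟩, hl⟩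
          · exact Or.inr ⟨hs, hl⟩
          · exact Or.inl ⟨r, ⟨hr, by simpa using hl⟩, rfl⟩

lemma pv_mem_foldl_union (f : Int → List (List String)) :
    ∀ (l : List Int) (r : PySem.Set (List String)) (x : List String),
    (x ∈ l.foldl (fun r k => PySem.Set.union r (PySem.Set.ofList (f k))) r ↔
      x ∈ r ∨ ∃ k ∈ l, x ∈ f k) := by
  intro l
  induction l with
  | nil => simp
  | cons a l ih =>
    intro r x
    simp only [List.foldl_cons, ih, PySem.Set.mem_union, PySem.Set.mem_ofList, List.mem_cons]
    constructor
    · rintro ((h | h) | ⟨k, hk, hx⟩)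
      · exact Or.inl h
      · exact Or.inr ⟨a, Or.inl rfl, h⟩
      · exact Or.inr ⟨k, Or.inr hk, hx⟩
    · rintro (h | ⟨k, (rfl | hk), hx⟩)
      · exact Or.inl (Or.inl h)
      · exact Or.inl (Or.inr hx)
      · exact Or.inr ⟨k, hk, hx⟩

lemma pv_nodup_foldl_union (f : Int → List (List String)) :
    ∀ (l : List Int) (r : PySem.Set (List String)), r.Nodup →
    (l.foldl (fun r k => PySem.Set.union r (PySem.Set.ofList (f k))) r).Nodup := by
  intro l
  induction l with
  | nil => intro r h; exact h
  | cons a l ih =>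
    intro r h
    exact ih _ (PySem.Set.nodup_union _ _ h)

lemma pv_len_pyRange (n : Int) : (PySem.List.pyRange 1 n 1).length = (n - 1).toNat := by
  simp [PySem.List.pyRange]
  omega

-- ===== VERDICT (by name: the statement is the Claim_ definition above) =====
theorem generate_n_spec : Claim_equal_generate_n := by
  unfold Claim_equal_generate_n
  intro words n _
  unfold Spec_generate_n
  rw [generate_n_eq]
  unfold generate_n_alt
  dsimp only
  rw [pv_foldl_iter (F := pvStep (PySem.List.sorted words (fun x => x) false).length)]
  set ws := PySem.List.sorted words (fun x => x) false with hws
  have hperm :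
      (PySem.Set.ofList
        ((((pvStep ws.length)^[(PySem.List.pyRange 1 n 1).length] (pvInit ws.length)).2).flatMap
          (fun c => c.map (pvWordOf ws)))).Perm
      ((PySem.List.pyRange 2 (n + 1) 1).foldl
        (fun r k => PySem.Set.union r (PySem.Set.ofList (pvCombos ws k.toNat)))
        (PySem.Set.ofList (pvCombos ws 1))) := by
    rw [List.perm_ext_iff_of_nodup (PySem.Set.nodup_ofList _)
      (pv_nodup_foldl_union _ _ _ (PySem.Set.nodup_ofList _))]
    intro x
    rw [PySem.Set.mem_ofList, memA, pv_mem_foldl_union, PySem.Set.mem_ofList,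
      mem_pvCombos, pv_len_pyRange]
    simp only [PySem.List.mem_pyRange_one, mem_pvCombos]
    constructor
    · rintro ⟨hs, h1, h2⟩
      by_cases hx : x.length = 1
      · exact Or.inl ⟨hs, hx⟩
      · refine Or.inr ⟨(x.length : Int), ⟨by omega, by omega⟩, hs, by omega⟩
    · rintro (⟨hs, hl⟩ | ⟨k, ⟨hk2, hkn⟩, hs, hl⟩)
      · exact ⟨hs, by omega, by omega⟩
      · exact ⟨hs, by omega, by omega⟩
  have := PySem.List.sorted_eq_sorted_of_perm (κ := List String) _ _
    (fun x => x) (fun a b hab => hab) hperm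
  convert this using 2
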